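-- pv_equiv track=rewrite | github.com/Mute10/python-practice | tempCode.py | negative
-- ===== SOURCE A (Python) =====
-- def negative(surface, gravity):
--   depth = 100
--   space = 9
--   result = 0
--   magnify = depth + space + result #100 + 9 + 0 =109
--   for s in surface:
--     for g in gravity: #No updates for s since all are positive numbers
--       if s < 0 or g < 0: #it's not until the second value in g until there's an update
--         depth -= 200     #when true, depth - 200, space 9 + 99, and result -100
--         space += 99       #magnify does the following: 109 + (109 - (-100) - 108 - (-100) * 2)
--         result -= 100      #simplified: magnify = 109 + (109 + 100 -108 + 200). magnify = 109 + 301 = 410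
--         magnify += magnify - depth - space - result * 2 #the key formula  for magnify causes exponential growth due to the recursive
--       else:                                        # magnify += magnify structure
--         continue
--   return result - magnify  #-631,238,239. without magnify is #16861
-- ===== SOURCE B (Python) =====
-- def negative(surface, gravity):
--     ns = sum(1 for s in surface if s < 0)
--     ng = sum(1 for g in gravity if g < 0)
--     k = ns * len(gravity) + (len(surface) - ns) * ng
--     return 201 * k + 493 - 602 * 2 ** k
-- ===== Notes on version B (the rewrite author's own statement) =====
-- stated objective: faster
-- what changed: Replaces the nested pair loop with counting negatives in each list once and a closed-form solution of the linear recurrence (magnify_i = 2*magnify_{i-1} + 301*i - 109), giving result 201*k + 493 - 602*2^k for k = ns*len(gravity) + (len(surface)-ns)*ng.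
import Mathlib
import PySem

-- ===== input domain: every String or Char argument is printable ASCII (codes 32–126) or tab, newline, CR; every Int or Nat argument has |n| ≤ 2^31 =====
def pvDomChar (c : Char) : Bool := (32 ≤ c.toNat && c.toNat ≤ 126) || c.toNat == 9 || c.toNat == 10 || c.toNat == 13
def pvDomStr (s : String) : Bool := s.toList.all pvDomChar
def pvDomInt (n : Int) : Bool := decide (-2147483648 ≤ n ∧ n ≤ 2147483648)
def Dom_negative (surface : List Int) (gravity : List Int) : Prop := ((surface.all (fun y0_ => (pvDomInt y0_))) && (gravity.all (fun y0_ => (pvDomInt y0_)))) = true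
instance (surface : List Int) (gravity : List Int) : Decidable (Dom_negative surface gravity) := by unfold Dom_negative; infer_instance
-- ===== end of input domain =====

-- B replaces A's nested pair loop by counting negatives once and a closed form
-- of the resulting linear recurrence (objective: faster).

-- ===== PORT A =====
-- one body of A's inner loop: the four updates, or the unchanged state
def negBody (s g : Int) (st : Int × Int × Int × Int) : Int × Int × Int × Int :=
  let (depth, space, result, magnify) := st
  if s < 0 ∨ g < 0 then
    let depth := depth - 200
    let space := space + 99
    let result := result - 100
    let magnify := magnify + (magnify - depth - space - result * 2)
    (depth, space, result, magnify)
  else st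

def negative (surface : List Int) (gravity : List Int) : Int :=
  let depth : Int := 100
  let space : Int := 9
  let result : Int := 0
  let magnify : Int := depth + space + result
  let st := surface.foldl (fun st s => gravity.foldl (fun st g => negBody s g st) st)
    (depth, space, result, magnify)
  st.2.2.1 - st.2.2.2

-- ===== PORT B =====
def negative_alt (surface : List Int) (gravity : List Int) : Int :=
  let ns := surface.countP (fun s => decide (s < 0))
  let ng := gravity.countP (fun g => decide (g < 0))
  let k := ns * gravity.length + (surface.length - ns) * ng
  201 * (k : Int) + 493 - 602 * 2 ^ k

-- ===== PRECONDITION & SPEC =====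
def Spec_negative (surface : List Int) (gravity : List Int) (out : Int) : Prop := out = negative_alt surface gravity
instance (surface : List Int) (gravity : List Int) (out : Int) : Decidable (Spec_negative surface gravity out) := by unfold Spec_negative; infer_instance

-- ===== CLAIM (what is proved, stated in full; the proofs are below) =====
def Claim_equal_negative : Prop := ∀ (surface : List Int) (gravity : List Int), Dom_negative surface gravity → Spec_negative surface gravity (negative surface gravity)

-- ===== LEMMAS AND PROOFS =====

-- the state after n updates
def phi (n : Nat) : Int × Int × Int × Int :=
  (100 - 200 * (n : Int), 9 + 99 * (n : Int), -(100 * (n : Int)),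
   602 * 2 ^ n - 301 * (n : Int) - 493)

theorem negBody_phi (s g : Int) (n : Nat) :
    negBody s g (phi n) = if s < 0 ∨ g < 0 then phi (n + 1) else phi n := by
  unfold negBody phi
  split_ifs with h
  · simp only [Prod.mk.injEq]
    push_cast
    refine ⟨by ring, by ring, by ring, by ring⟩
  · rfl

theorem inner_fold (s : Int) (gravity : List Int) (n : Nat) :
    gravity.foldl (fun st g => negBody s g st) (phi n)
      = phi (n + gravity.countP (fun g => decide (s < 0 ∨ g < 0))) := by
  induction gravity generalizing n with
  | nil => simp
  | cons g gs ih =>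
    simp only [List.foldl_cons, List.countP_cons, negBody_phi]
    by_cases h : s < 0 ∨ g < 0
    · have hd : decide (s < 0 ∨ g < 0) = true := by simpa using h
      rw [hd, if_pos h, ih]
      simp only [if_true]
      congr 1
      omega
    · have hd : decide (s < 0 ∨ g < 0) = false := by simpa using h
      rw [hd, if_neg h, ih]
      simp

-- total number of updating pairs, per-s form
def hits (surface gravity : List Int) : Nat :=
  (surface.map (fun s => gravity.countP (fun g => decide (s < 0 ∨ g < 0)))).sum

theorem outer_fold (surface gravity : List Int) (n : Nat) :
    surface.foldl (fun st s => gravity.foldl (fun st g => negBody s g st) st) (phi n)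
      = phi (n + hits surface gravity) := by
  induction surface generalizing n with
  | nil => simp [hits]
  | cons s ss ih =>
    simp only [List.foldl_cons, inner_fold, ih, hits, List.map_cons, List.sum_cons]
    ring_nf

theorem hits_eq (surface gravity : List Int) :
    hits surface gravity
      = surface.countP (fun s => decide (s < 0)) * gravity.length
        + (surface.length - surface.countP (fun s => decide (s < 0)))
            * gravity.countP (fun g => decide (g < 0)) := by
  induction surface with
  | nil => simp [hits]
  | cons s ss ih =>
    have hle : ss.countP (fun s => decide (s < 0)) ≤ ss.length := List.countP_le_length
    simp only [hits, List.map_cons, List.sum_cons, List.countP_cons, List.length_cons] at *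
    by_cases h : s < 0
    · have hd : decide (s < 0) = true := by simpa using h
      have hc : gravity.countP (fun g => decide (s < 0 ∨ g < 0)) = gravity.length := by
        apply List.countP_eq_length.mpr
        intro g _
        simp [h]
      rw [hc, ih]
      simp only [hd, if_true]
      have : ss.length + 1 - (ss.countP (fun s => decide (s < 0)) + 1)
          = ss.length - ss.countP (fun s => decide (s < 0)) := by omega
      rw [this]
      ring
    · have hd : decide (s < 0) = false := by simpa using h
      have hc : gravity.countP (fun g => decide (s < 0 ∨ g < 0))
          = gravity.countP (fun g => decide (g < 0)) := by
        apply List.countP_congr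
        intro g _
        simp [h]
      rw [hc, ih]
      simp only [hd, Bool.false_eq_true, if_false, Nat.add_zero]
      have : ss.length + 1 - ss.countP (fun s => decide (s < 0))
          = (ss.length - ss.countP (fun s => decide (s < 0))) + 1 := by omega
      rw [this]
      ring

-- ===== VERDICT (by name: the statement is the Claim_ definition above) =====
theorem negative_spec : Claim_equal_negative := by
  intro surface gravity _
  show (surface.foldl (fun st s => gravity.foldl (fun st g => negBody s g st) st)
      ((100 : Int), (9 : Int), (0 : Int), (100 : Int) + 9 + 0)).2.2.1
    - (surface.foldl (fun st s => gravity.foldl (fun st g => negBody s g st) st)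
      ((100 : Int), (9 : Int), (0 : Int), (100 : Int) + 9 + 0)).2.2.2
    = 201 * ((surface.countP (fun s => decide (s < 0)) * gravity.length
        + (surface.length - surface.countP (fun s => decide (s < 0)))
          * gravity.countP (fun g => decide (g < 0)) : Nat) : Int)
      + 493 - 602 * 2 ^ (surface.countP (fun s => decide (s < 0)) * gravity.length
        + (surface.length - surface.countP (fun s => decide (s < 0)))
          * gravity.countP (fun g => decide (g < 0)))
  have h0 : ((100 : Int), (9 : Int), (0 : Int), (100 : Int) + 9 + 0) = phi 0 := by
    simp [phi]
  rw [h0, outer_fold, Nat.zero_add, hits_eq surface gravity]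
  simp only [phi]
  push_cast
  ring
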